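-- pv_equiv track=rewrite | github.com/ilia-kats/CombinatorialProfiler | CombinatorialProfiler.py | generateBarcodes
-- ===== SOURCE A (Python) =====
-- def generateBarcodes(codes):
--     ccodes = {}
--     for i, c in codes.items():
--         ccodes[i] = {}
--         for k,b in c.items():
--             bcodes = []
--             for s in range(0, len(b)):
--                 found = False
--                 for key, barcode in codes[i].items():
--                     if not key == k and barcode.find(b[s:]) != -1:
--                         found = True
--                         break
--                 if not found:
--                     bcodes.append(b[s:])
--             ccodes[i][k] = tuple(bcodes)
--     return ccodes
-- ===== SOURCE B (Python) =====
-- def generateBarcodes(codes):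
--     # For each barcode b, "some sibling contains b[s:]" is monotone in s
--     # (b[s+1:] is a substring of b[s:]), so the kept suffixes are exactly
--     # b[0:], ..., b[t-1:] for the least hit position t.  Binary-search t.
--     result = {}
--     for i, group in codes.items():
--         res = {}
--         for k, b in group.items():
--             sibs = [bar for key, bar in codes[i].items() if key != k]
--             n = len(b)
--             if not sibs:
--                 t = n
--             else:
--                 lo, hi = 0, n  # '' is contained in any sibling, so the predicate holds at n
--                 while lo < hi:
--                     mid = (lo + hi) // 2
--                     if any(b[mid:] in bar for bar in sibs):
--                         hi = mid
--                     else: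
--                         lo = mid + 1
--                 t = lo
--             res[k] = tuple(b[s:] for s in range(t))
--         result[i] = res
--     return result
-- ===== Notes on version B (the rewrite author's own statement) =====
-- stated objective: faster
-- what changed: Instead of testing every suffix b[s:] against every sibling barcode, B uses the monotonicity of 'some sibling contains b[s:]' in s and binary-searches the least hit position t, returning the suffixes b[0:]..b[t-1:] directly.
import Mathlib
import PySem

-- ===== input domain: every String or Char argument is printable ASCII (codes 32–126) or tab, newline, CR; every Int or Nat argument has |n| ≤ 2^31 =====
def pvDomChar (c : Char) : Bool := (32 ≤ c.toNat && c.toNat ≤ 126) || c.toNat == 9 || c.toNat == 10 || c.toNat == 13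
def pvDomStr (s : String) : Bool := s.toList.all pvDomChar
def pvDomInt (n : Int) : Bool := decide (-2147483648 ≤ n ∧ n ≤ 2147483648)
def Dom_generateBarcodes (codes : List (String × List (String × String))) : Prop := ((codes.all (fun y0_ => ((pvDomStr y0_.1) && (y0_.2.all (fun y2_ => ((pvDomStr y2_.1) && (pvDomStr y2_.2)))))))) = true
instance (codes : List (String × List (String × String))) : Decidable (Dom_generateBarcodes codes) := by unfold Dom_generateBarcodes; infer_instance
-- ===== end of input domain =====

-- B replaces A's scan of every suffix position (each tested against every sibling barcode)
-- by a binary search for the least position whose suffix occurs in a sibling (that test is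
-- monotone in the position); dicts are ported as association lists (first-match lookup).

-- ===== PORT A =====
-- codes[i] : Python dict lookup = first match in the association list
def pvGroupA (codes : List (String × List (String × String))) (i : String) : List (String × String) :=
  ((codes.find? (fun p => p.1 == i)).map Prod.snd).getD []

-- the 'for key, barcode in codes[i].items(): … found = True; break' flag loop
def pvFoundA (g : List (String × String)) (k : String) (suf : String) : Bool :=
  g.any (fun kb => (!(kb.1 == k)) && (PySem.Str.find kb.2 suf != -1))

-- 'for s in range(0, len(b)): … if not found: bcodes.append(b[s:])'
def pvBcodesA (g : List (String × String)) (k b : String) : List String :=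
  (PySem.List.pyRange 0 (PySem.Str.len b) 1).foldl
    (fun acc s =>
      if !(pvFoundA g k (PySem.Str.slice b (some s) none)) then
        acc ++ [PySem.Str.slice b (some s) none]
      else acc) []

def generateBarcodes (codes : List (String × List (String × String))) :
    List (String × List (String × List String)) :=
  (codes.foldl
    (fun cc p =>
      cc.insert p.1
        (p.2.foldl (fun d kb => d.insert kb.1 (pvBcodesA (pvGroupA codes p.1) kb.1 kb.2))
          PySem.Dict.empty))
    (PySem.Dict.empty : PySem.Dict String (PySem.Dict String (List String)))).items.map
    (fun q => (q.1, q.2.items))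

-- ===== PORT B =====
-- Source B's 'while lo < hi' binary search ((lo+hi)//2 on nonnegative ints = Nat division)
def pvBisect (P : Nat → Bool) (lo hi : Nat) : Nat :=
  if _h : lo < hi then
    if P ((lo + hi) / 2) then pvBisect P lo ((lo + hi) / 2)
    else pvBisect P ((lo + hi) / 2 + 1) hi
  else lo
termination_by hi - lo
decreasing_by all_goals omega

-- 'sibs = [bar for key, bar in codes[i].items() if key != k]' (c below is codes[i])
def pvSibs (c : List (String × String)) (k : String) : List String :=
  (c.filter (fun kb => !(kb.1 == k))).map Prod.snd

def pvKeepB (c : List (String × String)) (k b : String) : List String :=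
  let sibs := pvSibs c k
  let n := (PySem.Str.len b).toNat   -- len(b) ≥ 0
  let t := if sibs.isEmpty then n
           else pvBisect
             (fun mid => sibs.any (fun bar => PySem.Str.isIn (PySem.Str.slice b (some (mid : Int)) none) bar))
             0 n
  (List.range t).map (fun (s : Nat) => PySem.Str.slice b (some (s : Int)) none)

def generateBarcodes_alt (codes : List (String × List (String × String))) :
    List (String × List (String × List String)) :=
  (codes.foldl
    (fun cc p =>
      cc.insert p.1
        (p.2.foldl (fun d kb => d.insert kb.1 (pvKeepB (pvGroupA codes p.1) kb.1 kb.2))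
          PySem.Dict.empty))
    (PySem.Dict.empty : PySem.Dict String (PySem.Dict String (List String)))).items.map
    (fun q => (q.1, q.2.items))

-- ===== PRECONDITION & SPEC =====
def Spec_generateBarcodes (codes : List (String × List (String × String)))
    (out : List (String × List (String × List String))) : Prop :=
  out = generateBarcodes_alt codes
instance (codes : List (String × List (String × String)))
    (out : List (String × List (String × List String))) : Decidable (Spec_generateBarcodes codes out) := by
  unfold Spec_generateBarcodes; infer_instance

-- ===== CLAIM (what is proved, stated in full; the proofs are below) =====
def Claim_equal_generateBarcodes : Prop :=
  ∀ (codes : List (String × List (String × String))), Dom_generateBarcodes codes →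
    Spec_generateBarcodes codes (generateBarcodes codes)

-- ===== LEMMAS AND PROOFS =====

-- the Prop behind both programs' per-position test: some sibling barcode contains b[s:]
def pvQ (c : List (String × String)) (k b : String) (s : Nat) : Prop :=
  ∃ kb ∈ c, ¬ kb.1 = k ∧ b.toList.drop s <:+: kb.2.toList

-- A's per-position test and B's bisection predicate, as functions of the Nat position
def pvPA (c : List (String × String)) (k b : String) (s : Nat) : Bool :=
  pvFoundA c k (PySem.Str.slice b (some (s : Int)) none)

def pvPB (c : List (String × String)) (k b : String) (s : Nat) : Bool :=
  (pvSibs c k).any (fun bar => PySem.Str.isIn (PySem.Str.slice b (some (s : Int)) none) bar)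

lemma pvBool_ext {x y : Bool} (h : x = true ↔ y = true) : x = y := by
  cases x <;> cases y <;> simp_all

lemma pvSlice_toList (b : String) (s : Nat) :
    (PySem.Str.slice b (some (s : Int)) none).toList = b.toList.drop s := by
  simp [PySem.Str.toList_slice, PySem.Chars.slice_eq_listSlice, PySem.List.slice_from_natCast]

lemma pvLen (b : String) : PySem.Str.len b = (b.toList.length : Int) := by
  simp [PySem.Str.len_eq]

lemma pvPA_iff (c : List (String × String)) (k b : String) (s : Nat) :
    (pvPA c k b s = true) ↔ pvQ c k b s := by
  unfold pvPA
  simp [pvFoundA, pvQ, List.any_eq_true, PySem.Str.find_eq,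
    bne_iff_ne, ne_eq, PySem.Chars.find_ne_neg_one_iff]

lemma pvPB_iff (c : List (String × String)) (k b : String) (s : Nat) :
    (pvPB c k b s = true) ↔ pvQ c k b s := by
  unfold pvPB
  constructor
  · intro h
    obtain ⟨bar, hbar, hin⟩ := List.any_eq_true.mp h
    obtain ⟨kb, hkb, rfl⟩ := List.mem_map.mp hbar
    have hkb' := List.mem_filter.mp hkb
    refine ⟨kb, hkb'.1, by simpa using hkb'.2, ?_⟩
    rw [← pvSlice_toList b s]
    exact (PySem.Str.isIn_eq _ _ ▸ PySem.Chars.isIn_iff_infix _ _).mp hin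
  · rintro ⟨kb, hkb, hne, hinf⟩
    apply List.any_eq_true.mpr
    refine ⟨kb.2, List.mem_map.mpr ⟨kb, List.mem_filter.mpr ⟨hkb, by simpa using hne⟩, rfl⟩, ?_⟩
    rw [PySem.Str.isIn_eq, PySem.Chars.isIn_iff_infix, pvSlice_toList]
    exact hinf

lemma pvQ_mono (c : List (String × String)) (k b : String) {s t : Nat} (h : s ≤ t)
    (hq : pvQ c k b s) : pvQ c k b t := by
  obtain ⟨kb, hmem, hne, hinf⟩ := hq
  refine ⟨kb, hmem, hne, ?_⟩
  have hst : b.toList.drop t = (b.toList.drop s).drop (t - s) := by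
    rw [List.drop_drop]; congr 1; omega
  rw [hst]
  exact ((List.drop_suffix _ _).isInfix).trans hinf

lemma pvQ_len (c : List (String × String)) (k b : String) :
    pvQ c k b b.toList.length ↔ ∃ kb ∈ c, ¬ kb.1 = k := by
  unfold pvQ
  constructor
  · rintro ⟨kb, h1, h2, -⟩; exact ⟨kb, h1, h2⟩
  · rintro ⟨kb, h1, h2⟩
    exact ⟨kb, h1, h2, by rw [List.drop_length]; exact List.nil_infix⟩

lemma pvBisect_rec (P : Nat → Bool) (mono : ∀ s t, s ≤ t → P s = true → P t = true) :
    ∀ (d lo hi : Nat), hi - lo ≤ d → lo ≤ hi → P hi = true → (∀ s, s < lo → P s = false) →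
      pvBisect P lo hi ≤ hi ∧ P (pvBisect P lo hi) = true ∧
        ∀ s, s < pvBisect P lo hi → P s = false := by
  intro d
  induction d with
  | zero =>
    intro lo hi hd hle hhi hlow
    have heq : lo = hi := by omega
    rw [pvBisect, dif_neg (by omega : ¬ lo < hi)]
    exact ⟨le_of_eq heq, heq ▸ hhi, hlow⟩
  | succ d ih =>
    intro lo hi hd hle hhi hlow
    by_cases hlt : lo < hi
    · rw [pvBisect, dif_pos hlt]
      by_cases hP : P ((lo + hi) / 2) = true
      · rw [if_pos hP]
        have h := ih lo ((lo + hi) / 2) (by omega) (by omega) hP hlow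
        exact ⟨le_trans h.1 (by omega), h.2.1, h.2.2⟩
      · have hPf : P ((lo + hi) / 2) = false := by
          revert hP; cases P ((lo + hi) / 2) <;> simp
        rw [if_neg (by simp [hPf])]
        have hlow' : ∀ s, s < (lo + hi) / 2 + 1 → P s = false := by
          intro s hs
          by_cases hsl : s < lo
          · exact hlow s hsl
          · cases hps : P s with
            | false => rfl
            | true =>
              exact absurd (mono s ((lo + hi) / 2) (by omega) hps) (by simp [hPf])
        exact ih ((lo + hi) / 2 + 1) hi (by omega) (by omega) hhi hlow'
    · rw [pvBisect, dif_neg hlt]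
      have heq : lo = hi := by omega
      exact ⟨le_of_eq heq, heq ▸ hhi, hlow⟩

lemma pvFilter_range (P : Nat → Bool) (n t : Nat) (ht : t ≤ n)
    (hlow : ∀ s, s < t → P s = false) (hhigh : ∀ s, t ≤ s → s < n → P s = true) :
    (List.range n).filter (fun s => !P s) = List.range t := by
  have hn : n = t + (n - t) := by omega
  rw [hn, List.range_add, List.filter_append]
  have h1 : (List.range t).filter (fun s => !P s) = List.range t := by
    apply List.filter_eq_self.mpr
    intro x hx
    simp [hlow x (List.mem_range.mp hx)]
  have h2 : ((List.range (n - t)).map (fun x => t + x)).filter (fun s => !P s) = [] := by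
    apply List.filter_eq_nil_iff.mpr
    intro x hx
    obtain ⟨y, hy, rfl⟩ := List.mem_map.mp hx
    have := hhigh (t + y) (by omega) (by have := List.mem_range.mp hy; omega)
    simp [this]
  rw [h1, h2, List.append_nil]

lemma pvCore (c : List (String × String)) (k b : String) :
    pvBcodesA c k b = pvKeepB c k b := by
  have hA : pvBcodesA c k b
      = ((List.range b.toList.length).filter (fun s => !(pvPA c k b s))).map
          (fun s : Nat => PySem.Str.slice b (some (s : Int)) none) := by
    unfold pvBcodesA
    rw [pvLen, PySem.List.pyRange_one]
    simp only [zero_add, sub_zero, Int.toNat_natCast]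
    rw [PySem.List.foldl_append_if, List.nil_append, List.filter_map, List.map_map]
    rfl
  have hB : pvKeepB c k b
      = (List.range (if (pvSibs c k).isEmpty then b.toList.length
            else pvBisect (pvPB c k b) 0 b.toList.length)).map
          (fun s : Nat => PySem.Str.slice b (some (s : Int)) none) := by
    simp only [pvKeepB]
    rw [pvLen]
    simp only [Int.toNat_natCast]
    rfl
  rw [hA, hB]
  by_cases hsib : (pvSibs c k).isEmpty = true
  · rw [if_pos hsib]
    congr 1
    have hnil : pvSibs c k = [] := List.isEmpty_iff.mp hsib
    have hno : ∀ s : Nat, pvPA c k b s = false := by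
      intro s
      cases hps : pvPA c k b s with
      | false => rfl
      | true =>
        obtain ⟨kb, hkb, hne, -⟩ := (pvPA_iff c k b s).mp hps
        have hm : kb.2 ∈ pvSibs c k :=
          List.mem_map.mpr ⟨kb, List.mem_filter.mpr ⟨hkb, by simpa using hne⟩, rfl⟩
        rw [hnil] at hm
        cases hm
    exact pvFilter_range (pvPA c k b) _ _ le_rfl (fun s _ => hno s)
      (fun s hs hsn => absurd (lt_of_le_of_lt hs hsn) (lt_irrefl _))
  · rw [if_neg hsib]
    congr 1
    have hmono : ∀ s t, s ≤ t → pvPB c k b s = true → pvPB c k b t = true := by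
      intro s t hst hs
      exact (pvPB_iff c k b t).mpr (pvQ_mono c k b hst ((pvPB_iff c k b s).mp hs))
    have hPn : pvPB c k b b.toList.length = true := by
      apply (pvPB_iff c k b _).mpr
      apply (pvQ_len c k b).mpr
      have hne : pvSibs c k ≠ [] := fun h => hsib (by simp [h])
      obtain ⟨bar, hbar⟩ := List.exists_mem_of_ne_nil _ hne
      obtain ⟨kb, hkb, rfl⟩ := List.mem_map.mp hbar
      have hkb' := List.mem_filter.mp hkb
      exact ⟨kb, hkb'.1, by simpa using hkb'.2⟩
    obtain ⟨hle, hPt, hlow⟩ :=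
      pvBisect_rec (pvPB c k b) hmono b.toList.length 0 b.toList.length (by omega)
        (Nat.zero_le _) hPn (fun s hs => absurd hs (Nat.not_lt_zero s))
    have hsame : ∀ s : Nat, pvPA c k b s = pvPB c k b s := fun s =>
      pvBool_ext ((pvPA_iff c k b s).trans (pvPB_iff c k b s).symm)
    calc (List.range b.toList.length).filter (fun s => !(pvPA c k b s))
        = (List.range b.toList.length).filter (fun s => !(pvPB c k b s)) :=
          List.filter_congr (fun x _ => by rw [hsame x])
      _ = List.range (pvBisect (pvPB c k b) 0 b.toList.length) :=
          pvFilter_range (pvPB c k b) _ _ hle hlow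
            (fun s hs _ => hmono (pvBisect (pvPB c k b) 0 b.toList.length) s hs hPt)

-- ===== VERDICT (by name: the statement is the Claim_ definition above) =====
theorem generateBarcodes_spec : Claim_equal_generateBarcodes := by
  intro codes _hdom
  unfold Spec_generateBarcodes generateBarcodes generateBarcodes_alt
  have hfun : (fun (cc : PySem.Dict String (PySem.Dict String (List String)))
        (p : String × List (String × String)) =>
        cc.insert p.1
          (p.2.foldl (fun d kb => d.insert kb.1 (pvBcodesA (pvGroupA codes p.1) kb.1 kb.2))
            PySem.Dict.empty))
      = (fun cc p =>
        cc.insert p.1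
          (p.2.foldl (fun d kb => d.insert kb.1 (pvKeepB (pvGroupA codes p.1) kb.1 kb.2))
            PySem.Dict.empty)) := by
    funext cc p
    have h2 : (fun (d : PySem.Dict String (List String)) (kb : String × String) =>
          d.insert kb.1 (pvBcodesA (pvGroupA codes p.1) kb.1 kb.2))
        = (fun d kb => d.insert kb.1 (pvKeepB (pvGroupA codes p.1) kb.1 kb.2)) := by
      funext d kb
      rw [pvCore]
    rw [h2]
  rw [hfun]
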